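-- pv_equiv track=rewrite | github.com/schets/convex_class_project | python/stemmer.py | _is_consonant
-- ===== SOURCE A (Python) =====
-- __vowels = frozenset(['a', 'e', 'i', 'o', 'u'])
--
-- def _is_consonant(word, i):
--     """Returns True if word[i] is a consonant, False otherwise
--
--     A consonant is defined in the paper as follows:
--
--         A consonant in a word is a letter other than A, E, I, O or
--         U, and other than Y preceded by a consonant. (The fact that
--         the term `consonant' is defined to some extent in terms of
--         itself does not make it ambiguous.) So in TOY the consonants
--         are T and Y, and in SYZYGY they are S, Z and G. If a letter
--         is not a consonant it is a vowel.
--     """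
--     if word[i] in __vowels:
--         return False
--     if word[i] == 'y':
--         if i == 0:
--             return True
--         else:
--             return not _is_consonant(word, i - 1)
--     return True
-- ===== SOURCE B (Python) =====
-- __vowels = frozenset(['a', 'e', 'i', 'o', 'u'])
--
-- def _is_consonant(word, i):
--     c = word[i]
--     if c in __vowels:
--         return False
--     if c != 'y':
--         return True
--     # y-case: scan backward over the run of consecutive 'y's, then flip once per 'y'
--     k = i if i >= 0 else i + len(word)
--     j = k
--     while j > 0 and word[j - 1] == 'y':
--         j -= 1
--     anchor = True if j == 0 else word[j - 1] in __vowels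
--     return anchor if (k - j) % 2 == 0 else not anchor
-- ===== Notes on version B (the rewrite author's own statement) =====
-- stated objective: alternative
-- what changed: Replaces A's chain of recursive calls walking back through a run of 'y' characters by a single backward scan to the run's start plus one parity flip (anchor value at the run start, negated iff the run length from the anchor is odd).
-- crash fix: On negative i whose actual position is preceded (inclusively) only by 'y' characters, A's recursion walks past the front of the string and raises IndexError, while B normalizes the index and returns the parity answer anchored at index 0. — e.g. on _is_consonant("yyo", -2): A raises IndexError, B returns false
import Mathlib
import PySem

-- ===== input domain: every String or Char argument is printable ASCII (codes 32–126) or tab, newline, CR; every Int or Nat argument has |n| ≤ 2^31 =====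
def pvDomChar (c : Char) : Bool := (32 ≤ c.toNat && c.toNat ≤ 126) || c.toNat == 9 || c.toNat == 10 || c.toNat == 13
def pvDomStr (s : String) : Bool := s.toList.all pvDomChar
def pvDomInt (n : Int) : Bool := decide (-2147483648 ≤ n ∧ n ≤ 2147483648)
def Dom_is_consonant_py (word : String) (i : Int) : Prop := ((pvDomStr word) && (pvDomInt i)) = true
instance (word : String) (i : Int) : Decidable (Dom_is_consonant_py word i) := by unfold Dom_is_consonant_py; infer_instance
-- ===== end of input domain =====

-- B replaces A's chain of recursive calls through a 'y'-run by one backward scan to the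
-- run's start plus a single parity flip (objective: alternative decomposition, same cost).


def pvAt (cs : List Char) (k : Nat) : Char := cs.getD k ' '

-- ===== PORT A =====
-- literal port of A's recursion; 'none' from pyGet? is Python's IndexError (outside Pre_), false there is a dummy
def is_consonant_py (word : String) (i : Int) : Bool :=
  match h : PySem.Str.pyGet? word i with
  | none => false
  | some c =>
    if c ∈ ['a', 'e', 'i', 'o', 'u'] then false
    else if c = 'y' then
      if i = 0 then true
      else !(is_consonant_py word (i - 1))
    else true
termination_by (i + word.toList.length + 1).toNat
decreasing_by
  rw [PySem.Str.pyGet?_eq, PySem.Chars.pyGet?_eq_listPyGet?] at h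
  have hin : PySem.Raise.InRange word.toList.length i := by
    by_contra hc
    have hn := (PySem.List.pyGet?_eq_none_iff (xs := word.toList) (i := i)).mpr hc
    rw [h] at hn
    exact Option.some_ne_none c hn
  have hiff : PySem.Raise.InRange word.toList.length i ↔
      -(word.toList.length : Int) ≤ i ∧ i < word.toList.length := by
    constructor <;> intro hh <;> exact (by simpa [PySem.Raise.InRange] using hh)
  have := hiff.mp hin
  omega

-- ===== PORT B =====
-- the while-loop 'while j > 0 and word[j-1] == 'y': j -= 1' as structural recursion on j
def pvRunStart (cs : List Char) : Nat → Nat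
  | 0 => 0
  | j + 1 => if pvAt cs j = 'y' then pvRunStart cs j else j + 1

def is_consonant_py_alt (word : String) (i : Int) : Bool :=
  match PySem.Str.pyGet? word i with
  | none => false
  | some c =>
    if c ∈ ['a', 'e', 'i', 'o', 'u'] then false
    else if c ≠ 'y' then true
    else
      let k : Nat := (if 0 ≤ i then i else i + word.toList.length).toNat
      let j := pvRunStart word.toList k
      let anchor : Bool :=
        if j = 0 then true else decide (pvAt word.toList (j - 1) ∈ ['a', 'e', 'i', 'o', 'u'])
      if (k - j) % 2 = 0 then anchor else !anchor

-- ===== PRECONDITION & SPEC =====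
-- Pre_ excludes exactly the inputs where A raises IndexError: i out of range, and negative i
-- whose actual position is preceded (inclusively) only by 'y' characters, on which A's
-- recursion runs off the front of the string.
def Pre_is_consonant_py (word : String) (i : Int) : Prop :=
  -(word.toList.length : Int) ≤ i ∧ i < word.toList.length ∧
  (0 ≤ i ∨ ∃ m < (i + word.toList.length).toNat + 1, pvAt word.toList m ≠ 'y')
instance (word : String) (i : Int) : Decidable (Pre_is_consonant_py word i) := by
  unfold Pre_is_consonant_py; infer_instance

def pvWitness_is_consonant_py : String × Int := ("toy", 2)

-- On negative i whose actual position is covered by an all-'y' prefix, A raises IndexError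
-- (its recursion walks past the front of the string) while B returns the parity answer.
def Raises_is_consonant_py (word : String) (i : Int) : Prop :=
  -(word.toList.length : Int) ≤ i ∧ i < 0 ∧
  ∀ m < (i + word.toList.length).toNat + 1, pvAt word.toList m = 'y'
instance (word : String) (i : Int) : Decidable (Raises_is_consonant_py word i) := by
  unfold Raises_is_consonant_py; infer_instance
def pvRaiseWitness_is_consonant_py : String × Int := ("yyo", -2)
def pvRaiseWitnessOut_is_consonant_py : Bool := false

def Spec_is_consonant_py (word : String) (i : Int) (out : Bool) : Prop := out = is_consonant_py_alt word i
instance (word : String) (i : Int) (out : Bool) : Decidable (Spec_is_consonant_py word i out) := by unfold Spec_is_consonant_py; infer_instance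

-- ===== CLAIM (what is proved, stated in full; the proofs are below) =====
def Claim_equal_is_consonant_py : Prop := ∀ (word : String) (i : Int), Dom_is_consonant_py word i → Pre_is_consonant_py word i → Spec_is_consonant_py word i (is_consonant_py word i)
def Claim_raises_is_consonant_py : Prop := (∀ (word : String) (i : Int), Dom_is_consonant_py word i → Raises_is_consonant_py word i → ¬ Pre_is_consonant_py word i) ∧ (Dom_is_consonant_py (pvRaiseWitness_is_consonant_py.1) (pvRaiseWitness_is_consonant_py.2) ∧ Raises_is_consonant_py (pvRaiseWitness_is_consonant_py.1) (pvRaiseWitness_is_consonant_py.2) ∧ is_consonant_py_alt (pvRaiseWitness_is_consonant_py.1) (pvRaiseWitness_is_consonant_py.2) = pvRaiseWitnessOut_is_consonant_py)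

-- ===== LEMMAS AND PROOFS =====

-- the common value both ports compute at an in-range ACTUAL (nonnegative) position
def pvConsN (cs : List Char) : Nat → Bool
  | 0 =>
    if pvAt cs 0 ∈ ['a', 'e', 'i', 'o', 'u'] then false else true
  | k + 1 =>
    if pvAt cs (k + 1) ∈ ['a', 'e', 'i', 'o', 'u'] then false
    else if pvAt cs (k + 1) = 'y' then !pvConsN cs k
    else true

theorem pvConsN_vowel (cs : List Char) (k : Nat) (hv : pvAt cs k ∈ ['a', 'e', 'i', 'o', 'u']) :
    pvConsN cs k = false := by
  cases k <;> simp [pvConsN, hv]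

theorem pvConsN_other (cs : List Char) (k : Nat) (hv : pvAt cs k ∉ ['a', 'e', 'i', 'o', 'u'])
    (hy : pvAt cs k ≠ 'y') : pvConsN cs k = true := by
  cases k <;> simp [pvConsN, hv, hy]

theorem pvRunStart_le (cs : List Char) (k : Nat) : pvRunStart cs k ≤ k := by
  induction k with
  | zero => simp [pvRunStart]
  | succ j ih =>
    simp only [pvRunStart]
    split
    · omega
    · omega

theorem pvConsN_y (cs : List Char) (k : Nat) (hy : pvAt cs k = 'y') :
    pvConsN cs k =
      (if (k - pvRunStart cs k) % 2 = 0 then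
        (if pvRunStart cs k = 0 then true
         else decide (pvAt cs (pvRunStart cs k - 1) ∈ ['a', 'e', 'i', 'o', 'u']))
       else !(if pvRunStart cs k = 0 then true
         else decide (pvAt cs (pvRunStart cs k - 1) ∈ ['a', 'e', 'i', 'o', 'u']))) := by
  induction k with
  | zero =>
    have : pvAt cs 0 ∉ ['a', 'e', 'i', 'o', 'u'] := by rw [hy]; decide
    simp [pvConsN, pvRunStart, this]
  | succ j ih =>
    have hnv : pvAt cs (j + 1) ∉ ['a', 'e', 'i', 'o', 'u'] := by rw [hy]; decide
    have hcons : pvConsN cs (j + 1) = !pvConsN cs j := by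
      simp [pvConsN, hy]
    by_cases hj : pvAt cs j = 'y'
    · have hr : pvRunStart cs (j + 1) = pvRunStart cs j := by simp [pvRunStart, hj]
      have hle := pvRunStart_le cs j
      have hpar : (j + 1 - pvRunStart cs j) % 2 = (j - pvRunStart cs j + 1) % 2 := by omega
      rw [hcons, ih hj, hr, hpar]
      rcases Nat.even_or_odd (j - pvRunStart cs j) with he | ho
      · have h0 : (j - pvRunStart cs j) % 2 = 0 := Nat.even_iff.mp he
        have h1 : (j - pvRunStart cs j + 1) % 2 = 1 := by omega
        simp [h0, h1]
      · have h0 : (j - pvRunStart cs j) % 2 = 1 := Nat.odd_iff.mp ho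
        have h1 : (j - pvRunStart cs j + 1) % 2 = 0 := by omega
        simp [h0, h1]
    · have hr : pvRunStart cs (j + 1) = j + 1 := by simp [pvRunStart, hj]
      rw [hcons, hr]
      by_cases hv : pvAt cs j ∈ ['a', 'e', 'i', 'o', 'u']
      · rw [pvConsN_vowel cs j hv]
        simp [hv]
      · rw [pvConsN_other cs j hv hj]
        simp [hv]

-- normalized index: pyGet? at i is the char at the actual nonnegative position
theorem pvGet_norm (word : String) (i : Int)
    (h1 : -(word.toList.length : Int) ≤ i) (h2 : i < word.toList.length) :
    PySem.Str.pyGet? word i =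
      some (pvAt word.toList ((if 0 ≤ i then i else i + word.toList.length).toNat)) ∧
    (if 0 ≤ i then i else i + word.toList.length).toNat < word.toList.length := by
  set cs := word.toList with hcs
  set k : Nat := (if 0 ≤ i then i else i + (cs.length : Int)).toNat with hk
  have hklt : k < cs.length := by
    by_cases h0 : 0 ≤ i <;> simp [hk, h0] <;> omega
  refine ⟨?_, hklt⟩
  have hget : PySem.Str.pyGet? word i = cs[k]? := by
    rw [PySem.Str.pyGet?_eq, PySem.Chars.pyGet?_eq_listPyGet?, ← hcs]
    by_cases h0 : 0 ≤ i
    · rw [PySem.List.pyGet?_of_nonneg cs h0]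
      simp [hk, h0]
    · have hik : i = -(((-i).toNat : Nat) : Int) := by omega
      rw [hik, PySem.List.pyGet?_neg_natCast cs (-i).toNat (by omega) (by omega)]
      congr 1
      simp [hk, h0]
      omega
  rw [hget, List.getElem?_eq_getElem hklt]
  simp [pvAt, List.getD_eq_getElem?_getD, List.getElem?_eq_getElem hklt]

-- B equals pvConsN at every in-range index
theorem alt_eq_consN (word : String) (i : Int)
    (h1 : -(word.toList.length : Int) ≤ i) (h2 : i < word.toList.length) :
    is_consonant_py_alt word i =
      pvConsN word.toList (if 0 ≤ i then i else i + word.toList.length).toNat := by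
  obtain ⟨hget, hklt⟩ := pvGet_norm word i h1 h2
  set cs := word.toList with hcs
  set k : Nat := (if 0 ≤ i then i else i + (cs.length : Int)).toNat with hk
  unfold is_consonant_py_alt
  rw [hget]
  simp only [← hcs, ← hk]
  by_cases hv : pvAt cs k ∈ ['a', 'e', 'i', 'o', 'u']
  · rw [pvConsN_vowel cs k hv]
    simp [hv]
  · by_cases hy : pvAt cs k = 'y'
    · rw [pvConsN_y cs k hy]
      simp [hy]
    · rw [pvConsN_other cs k hv hy]
      simp [hv, hy]

-- A equals pvConsN at every in-range index admitted by Pre_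
theorem a_eq_consN (k : Nat) : ∀ (word : String) (i : Int),
    -(word.toList.length : Int) ≤ i → i < word.toList.length →
    (0 ≤ i ∨ ∃ m < (i + word.toList.length).toNat + 1, pvAt word.toList m ≠ 'y') →
    (if 0 ≤ i then i else i + (word.toList.length : Int)).toNat = k →
    is_consonant_py word i = pvConsN word.toList k := by
  induction k using Nat.strong_induction_on with
  | _ k ih =>
    intro word i h1 h2 h3 hk
    obtain ⟨hget, hklt⟩ := pvGet_norm word i h1 h2
    rw [hk] at hget hklt
    rw [is_consonant_py, hget]
    by_cases hv : pvAt word.toList k ∈ ['a', 'e', 'i', 'o', 'u']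
    · rw [pvConsN_vowel _ k hv]
      simp [hv]
    · by_cases hy : pvAt word.toList k = 'y'
      · simp only [hy]
        by_cases hi0 : i = 0
        · have hk0 : k = 0 := by rw [← hk, if_pos (le_of_eq hi0.symm), hi0]; rfl
          subst hk0
          simp [hi0, pvConsN, hy]
        · have hkpos : 0 < k := by
            rcases h3 with h0 | ⟨m, hm, hne⟩
            · by_contra hc
              have : i = 0 := by
                rw [if_pos h0] at hk
                omega
              exact hi0 this
            · by_contra hc
              have hk0 : k = 0 := by omega
              have hmk : m ≤ k := by
                by_cases hge : 0 ≤ i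
                · rw [if_pos hge] at hk
                  omega
                · rw [if_neg hge] at hk
                  omega
              have : m = 0 := by omega
              subst this
              rw [hk0] at hy
              exact hne hy
          obtain ⟨k', rfl⟩ : ∃ k', k = k' + 1 := ⟨k - 1, by omega⟩
          have hnorm' : (if 0 ≤ i - 1 then i - 1 else i - 1 + (word.toList.length : Int)).toNat = k' := by
            by_cases hge : 0 ≤ i
            · rw [if_pos hge] at hk
              have hge' : 0 ≤ i - 1 := by omega
              rw [if_pos hge']
              omega
            · rw [if_neg hge] at hk
              have hge' : ¬ 0 ≤ i - 1 := by omega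
              rw [if_neg hge']
              omega
          have h1' : -(word.toList.length : Int) ≤ i - 1 := by
            by_cases hge : 0 ≤ i
            · omega
            · rw [if_neg hge] at hk
              omega
          have h2' : i - 1 < word.toList.length := by omega
          have h3' : 0 ≤ i - 1 ∨ ∃ m < (i - 1 + word.toList.length).toNat + 1, pvAt word.toList m ≠ 'y' := by
            by_cases hge : 0 ≤ i - 1
            · exact Or.inl hge
            · right
              rcases h3 with h0 | ⟨m, hm, hne⟩
              · omega
              · refine ⟨m, ?_, hne⟩
                have hge2 : ¬ 0 ≤ i := by omega
                rw [if_neg hge2] at hk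
                have : m ≠ k' + 1 := by
                  intro hmeq
                  rw [hmeq] at hne
                  exact hne hy
                omega
          rw [if_neg hi0, ih k' (by omega) word (i - 1) h1' h2' h3' hnorm']
          simp [pvConsN, hy]
      · rw [pvConsN_other _ k hv hy]
        simp [hv, hy]

-- ===== VERDICT (by name: the statement is the Claim_ definition above) =====
theorem is_consonant_py_spec : Claim_equal_is_consonant_py := by
  intro word i _ hpre
  unfold Spec_is_consonant_py
  obtain ⟨h1, h2, h3⟩ := hpre
  rw [a_eq_consN _ word i h1 h2 h3 rfl, alt_eq_consN word i h1 h2]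

@[simp] theorem is_consonant_py_raises : Claim_raises_is_consonant_py := by
  unfold Claim_raises_is_consonant_py
  constructor
  · intro word i _ hr hp
    obtain ⟨r1, r2, r3⟩ := hr
    obtain ⟨p1, p2, p3⟩ := hp
    rcases p3 with h0 | ⟨m, hm, hne⟩
    · omega
    · exact hne (r3 m hm)
  · exact ⟨by decide, by decide, by decide⟩
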